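-- pv_equiv track=rewrite | github.com/oidiegobarros/symmetric-difference | main.py | symmetric_difference
-- ===== SOURCE A (Python) =====
-- def symmetric_difference(args):
--     should_be = set()
--     for arg in args:
--         for i in arg:
--             just_pass = True
--             if i in should_be and i in arg:
--                 should_be.remove(i)
--                 just_pass = False
--             if just_pass and i not in should_be and i in arg:
--                 should_be.add(i)
--     return sorted(should_be)
-- ===== SOURCE B (Python) =====
-- def symmetric_difference(args):
--     counts = {}
--     for arg in args:
--         for i in arg:
--             counts[i] = counts.get(i, 0) + 1
--     return sorted(k for k, c in counts.items() if c % 2 == 1)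
-- ===== Notes on version B (the rewrite author's own statement) =====
-- stated objective: faster
-- what changed: Replaces the per-occurrence set add/remove toggle (whose redundant 'i in arg' tests scan the current sublist on every element) by a single counting pass into a dict followed by a separate filter keeping keys with odd count, then sorted.
import Mathlib
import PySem

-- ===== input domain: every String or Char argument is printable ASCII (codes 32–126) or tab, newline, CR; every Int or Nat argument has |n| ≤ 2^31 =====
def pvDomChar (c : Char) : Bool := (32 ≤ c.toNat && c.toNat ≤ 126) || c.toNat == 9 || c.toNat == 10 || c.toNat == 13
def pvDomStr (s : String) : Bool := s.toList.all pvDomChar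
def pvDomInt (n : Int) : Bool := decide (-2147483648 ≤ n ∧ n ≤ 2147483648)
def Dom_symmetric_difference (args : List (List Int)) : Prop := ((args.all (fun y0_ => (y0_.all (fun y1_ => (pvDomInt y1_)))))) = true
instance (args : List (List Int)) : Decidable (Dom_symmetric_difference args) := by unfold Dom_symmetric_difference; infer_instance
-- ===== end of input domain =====

-- B replaces A's per-occurrence set add/remove toggle by one counting pass into a dict
-- plus a separate odd-count filter, then sorted (measured faster: no per-element 'i in arg' scans).


-- ===== PORT A =====
-- 'should_be.remove(i)' is ported as Set.discard: it runs only under 'i in should_be',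
-- where remove and discard coincide (remove cannot raise there).
def symmetric_difference (args : List (List Int)) : List Int :=
  let should_be : PySem.Set Int :=
    args.foldl (fun should_be arg =>
      arg.foldl (fun should_be i =>
        let just_pass := true
        let (should_be, just_pass) :=
          if PySem.Set.contains should_be i && arg.contains i then
            (PySem.Set.discard should_be i, false)
          else (should_be, just_pass)
        if just_pass && !(PySem.Set.contains should_be i) && arg.contains i then
          PySem.Set.add should_be i
        else should_be) should_be) PySem.Set.empty
  PySem.List.sorted should_be (fun x => x) false

-- ===== PORT B =====
def symmetric_difference_alt (args : List (List Int)) : List Int :=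
  let counts : PySem.Dict Int Int :=
    args.foldl (fun counts arg =>
      arg.foldl (fun counts i => counts.insert i (counts.getD i 0 + 1)) counts)
      PySem.Dict.empty
  PySem.List.sorted
    ((counts.items.filter (fun kc => PySem.Int.mod kc.2 2 == 1)).map (·.1))
    (fun x => x) false

-- ===== PRECONDITION & SPEC =====
def Spec_symmetric_difference (args : List (List Int)) (out : List Int) : Prop := out = symmetric_difference_alt args
instance (args : List (List Int)) (out : List Int) : Decidable (Spec_symmetric_difference args out) := by unfold Spec_symmetric_difference; infer_instance

-- ===== CLAIM (what is proved, stated in full; the proofs are below) =====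
def Claim_equal_symmetric_difference : Prop := ∀ (args : List (List Int)), Dom_symmetric_difference args → Spec_symmetric_difference args (symmetric_difference args)

-- ===== LEMMAS AND PROOFS =====

-- pure toggle step: A's inner body for i ∈ arg
def pvToggle (s : PySem.Set Int) (i : Int) : PySem.Set Int :=
  if PySem.Set.contains s i then PySem.Set.discard s i else PySem.Set.add s i

theorem pvStepA_eq_toggle (arg : List Int) (s : PySem.Set Int) {i : Int} (hi : i ∈ arg) :
    (let just_pass := true
     let (s, just_pass) :=
       if PySem.Set.contains s i && arg.contains i then (PySem.Set.discard s i, false)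
       else (s, just_pass)
     if just_pass && !(PySem.Set.contains s i) && arg.contains i then PySem.Set.add s i
     else s) = pvToggle s i := by
  by_cases h : i ∈ s <;>
    simp [pvToggle, hi, h]

theorem pvInnerA (arg : List Int) (s : PySem.Set Int) :
    arg.foldl (fun should_be i =>
        let just_pass := true
        let (should_be, just_pass) :=
          if PySem.Set.contains should_be i && arg.contains i then
            (PySem.Set.discard should_be i, false)
          else (should_be, just_pass)
        if just_pass && !(PySem.Set.contains should_be i) && arg.contains i then
          PySem.Set.add should_be i
        else should_be) s
      = arg.foldl pvToggle s := by
  apply PySem.List.foldl_congr_mem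
  intro a b hb
  exact pvStepA_eq_toggle arg a hb

theorem pvNestedFoldl {α β : Type} (args : List (List α)) (g : β → α → β) (d : β) :
    args.foldl (fun d arg => arg.foldl g d) d = (args.flatMap id).foldl g d := by
  induction args generalizing d with
  | nil => rfl
  | cons a t ih => simp [List.flatMap_cons, List.foldl_append, ih]

theorem pvToggle_nodup {s : PySem.Set Int} (h : s.Nodup) (i : Int) : (pvToggle s i).Nodup := by
  unfold pvToggle
  split
  · exact PySem.Set.nodup_discard s i h
  · exact PySem.Set.nodup_add s i h

theorem pvMem_toggle (s : PySem.Set Int) (i x : Int) :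
    x ∈ pvToggle s i ↔ Xor' (x ∈ s) (x = i) := by
  unfold pvToggle
  by_cases hc : PySem.Set.contains s i
  · have hi : i ∈ s := (PySem.Set.contains_iff s i).1 hc
    simp only [if_pos hc, PySem.Set.mem_discard, Xor']
    constructor
    · rintro ⟨hs, hne⟩; exact Or.inl ⟨hs, hne⟩
    · rintro (⟨hs, hne⟩ | ⟨hxi, hns⟩)
      · exact ⟨hs, hne⟩
      · exact absurd (hxi ▸ hi) hns
  · have hi : i ∉ s := fun hm => hc ((PySem.Set.contains_iff s i).2 hm)
    simp only [if_neg hc, PySem.Set.mem_add, Xor']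
    constructor
    · rintro (hs | hxi)
      · exact Or.inl ⟨hs, fun hxi => hi (hxi ▸ hs)⟩
      · exact Or.inr ⟨hxi, hxi ▸ hi⟩
    · rintro (⟨hs, _⟩ | ⟨hxi, _⟩)
      · exact Or.inl hs
      · exact Or.inr hxi

theorem pvFoldToggle (l : List Int) :
    ∀ (s : PySem.Set Int), s.Nodup →
      (l.foldl pvToggle s).Nodup ∧
      ∀ x, (x ∈ l.foldl pvToggle s ↔ Xor' (x ∈ s) (Odd (l.count x))) := by
  induction l with
  | nil =>
    intro s hs
    refine ⟨hs, fun x => ?_⟩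
    simp [Xor', Nat.odd_iff]
  | cons a t ih =>
    intro s hs
    have hts := pvToggle_nodup hs a
    obtain ⟨hn, hm⟩ := ih (pvToggle s a) hts
    refine ⟨hn, fun x => ?_⟩
    rw [List.foldl_cons] at *
    rw [hm x, pvMem_toggle s a x]
    by_cases hx : x = a
    · subst hx
      simp [List.count_cons_self, Nat.odd_add_one, Xor', Nat.not_odd_iff_even]
      tauto
    · simp [Xor', Ne.symm hx]
      tauto

-- B's counting fold is exactly PySem.Dict.counter of the flattened list
theorem pvCounts_eq_counter (flat : List Int) :
    flat.foldl (fun counts i => counts.insert i (counts.getD i 0 + 1)) PySem.Dict.empty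
      = PySem.Dict.counter flat := by
  rw [PySem.Dict.counter_eq_foldl]
  apply PySem.List.foldl_congr_mem
  intro d b _
  simp [PySem.Dict.modify]

theorem symmetric_difference_spec : Claim_equal_symmetric_difference := by
  intro args _
  unfold Spec_symmetric_difference symmetric_difference symmetric_difference_alt
  simp only
  set flat := args.flatMap id with hflat
  -- A's set
  have hA : (args.foldl (fun should_be arg =>
      arg.foldl (fun should_be i =>
        let just_pass := true
        let (should_be, just_pass) :=
          if PySem.Set.contains should_be i && arg.contains i then
            (PySem.Set.discard should_be i, false)
          else (should_be, just_pass)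
        if just_pass && !(PySem.Set.contains should_be i) && arg.contains i then
          PySem.Set.add should_be i
        else should_be) should_be) PySem.Set.empty)
      = flat.foldl pvToggle [] := by
    rw [← pvNestedFoldl]
    apply PySem.List.foldl_congr_mem
    intro s arg _
    exact pvInnerA arg s
  rw [hA]
  obtain ⟨hAnodup, hAmem⟩ := pvFoldToggle flat [] (by simp)
  -- B's list
  rw [pvNestedFoldl args (fun (counts : PySem.Dict Int Int) i => counts.insert i (counts.getD i 0 + 1)) PySem.Dict.empty,
     pvCounts_eq_counter flat, PySem.Dict.items_counter]
  have hBlist : (((PySem.Set.ofList flat).map (fun k => (k, (flat.count k : Int)))).filter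
        (fun kc => PySem.Int.mod kc.2 2 == 1)).map (·.1)
      = (PySem.Set.ofList flat).filter (fun k => PySem.Int.mod (flat.count k) 2 == 1) := by
    rw [List.filter_map, List.map_map]
    simp [Function.comp_def]
  rw [hBlist]
  have hodd : ∀ k : Int, (PySem.Int.mod ((flat.count k : Nat) : Int) 2 == 1) = true ↔
      Odd (flat.count k) := by
    intro k
    rw [Nat.odd_iff]
    simp only [PySem.Int.mod, Int.fmod_eq_emod, beq_iff_eq]
    omega
  apply PySem.List.sorted_eq_sorted_of_perm _ _ _ (fun a b h => h)
  rw [List.perm_ext_iff_of_nodup hAnodup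
      (List.Nodup.filter _ (PySem.Set.nodup_ofList flat))]
  intro x
  rw [hAmem x, List.mem_filter, PySem.Set.mem_ofList flat x, hodd x]
  constructor
  · intro hx
    rcases hx with ⟨_, h⟩ | ⟨h, _⟩
    · simp at *
    · exact ⟨List.count_pos_iff.1 h.pos, h⟩
  · rintro ⟨_, h⟩
    exact Or.inr ⟨h, by simp⟩
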